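-- pv_equiv track=rewrite | github.com/gksky23/CommaSprinkler_python | J.py | f
-- ===== SOURCE A (Python) =====
-- def head(l):
-- 	if len(l)==0: return([])
-- 	else:
-- 		li=list(l)
-- 		return(li[0])
--
-- def last(l):
-- 	if len(l)==0: return([])
-- 	else:
-- 		li=list(l)
-- 		li.reverse()
-- 		return(li[0])
--
-- def forwardAppend(s,l):
-- 	return([s]+l)
--
-- def f(a):
-- 	if len(a)==1:
-- 		return(a)
-- 	else:
-- 		s,s1,*ss=a
-- 		if not(head(s1)==',' or head(s1)=='.') and (last(s)==',' or last(s)=='.'):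
-- 			return forwardAppend(s,f(forwardAppend((last(s)+s1),ss)))
-- 		elif (head(s1)==','or head(s1)=='.')and not((last(s)==',') or (last(s)=='.')):
-- 			return forwardAppend((s+head(s1)),f(forwardAppend(s1,ss)))
-- 		else: return forwardAppend(s,f(forwardAppend(s1,ss)))
-- ===== SOURCE B (Python) =====
-- def f(a):
--     if len(a) == 1:
--         return a
--     res = []
--     cur = a[0]
--     for nxt in a[1:]:
--         h = nxt[:1]
--         l = cur[-1:]
--         if h not in (',', '.') and l in (',', '.'):
--             res.append(cur)
--             cur = l + nxt
--         elif h in (',', '.') and l not in (',', '.'):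
--             res.append(cur + h)
--             cur = nxt
--         else:
--             res.append(cur)
--             cur = nxt
--     res.append(cur)
--     return res
-- ===== Notes on version B (the rewrite author's own statement) =====
-- stated objective: faster
-- what changed: Replaced A's recursion that rebuilds the remaining tail with [s]+... list copies at every step by a single left-to-right loop carrying the current token and appending to one result list.
-- outside the precondition, e.g. on f([]): A raises ValueError, B raises IndexError
import Mathlib
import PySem

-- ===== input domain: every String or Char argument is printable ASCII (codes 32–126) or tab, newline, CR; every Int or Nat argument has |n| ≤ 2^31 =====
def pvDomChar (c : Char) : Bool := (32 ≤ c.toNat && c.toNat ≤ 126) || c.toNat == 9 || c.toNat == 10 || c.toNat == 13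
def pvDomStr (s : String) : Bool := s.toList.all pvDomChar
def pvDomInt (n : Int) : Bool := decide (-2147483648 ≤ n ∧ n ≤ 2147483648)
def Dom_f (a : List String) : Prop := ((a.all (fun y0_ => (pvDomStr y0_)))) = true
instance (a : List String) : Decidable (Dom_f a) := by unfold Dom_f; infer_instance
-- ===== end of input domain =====

-- B replaces A's O(n^2) rebuild-the-tail recursion by one left-to-right pass with an accumulator (same return value; neither mutates its argument).

-- ===== PORT A =====
-- head(l): [] on empty, else first char (a 1-char string); modelled as the ≤1-char List Char l.take 1
def pvHead (s : String) : List Char := s.toList.take 1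
-- last(l): reverse then take the first element, same ≤1-char representation
def pvLast (s : String) : List Char := s.toList.reverse.take 1

def f (a : List String) : List String :=
  match a with
  | [] => []        -- Python: the unpacking 's,s1,*ss = a' raises ValueError here (excluded by Pre_f)
  | [s] => [s]
  | s :: s1 :: ss =>
    if ¬(pvHead s1 = [','] ∨ pvHead s1 = ['.']) ∧ (pvLast s = [','] ∨ pvLast s = ['.']) then
      s :: f (String.mk (pvLast s ++ s1.toList) :: ss)
    else if (pvHead s1 = [','] ∨ pvHead s1 = ['.']) ∧ ¬(pvLast s = [','] ∨ pvLast s = ['.']) then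
      String.mk (s.toList ++ pvHead s1) :: f (s1 :: ss)
    else
      s :: f (s1 :: ss)
  termination_by a.length
  decreasing_by all_goals simp

-- ===== PORT B =====
-- the loop of Source B: res is the accumulator (built backwards, reversed at the end), cur the carried token
def fAltGo (res : List String) (cur : String) : List String → List String
  | [] => (cur :: res).reverse
  | nxt :: rest =>
    let h := pvHead nxt        -- nxt[:1]
    let l := pvLast cur        -- cur[-1:]
    if ¬(h = [','] ∨ h = ['.']) ∧ (l = [','] ∨ l = ['.']) then
      fAltGo (cur :: res) (String.mk (l ++ nxt.toList)) rest
    else if (h = [','] ∨ h = ['.']) ∧ ¬(l = [','] ∨ l = ['.']) then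
      fAltGo (String.mk (cur.toList ++ h) :: res) nxt rest
    else
      fAltGo (cur :: res) nxt rest

def f_alt (a : List String) : List String :=
  if a.length = 1 then a
  else
    match a with
    | [] => []      -- Python: a[0] raises IndexError here (excluded by Pre_f)
    | x :: xs => fAltGo [] x xs

-- ===== PRECONDITION & SPEC =====
-- A raises ValueError on the empty list (and B raises IndexError), so [] is excluded.
def Pre_f (a : List String) : Prop := a ≠ []
instance (a : List String) : Decidable (Pre_f a) := by unfold Pre_f; infer_instance
def pvWitness_f : List String := ["hello,", "world"]
def Spec_f (a : List String) (out : List String) : Prop := out = f_alt a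
instance (a : List String) (out : List String) : Decidable (Spec_f a out) := by unfold Spec_f; infer_instance

-- ===== CLAIM (what is proved, stated in full; the proofs are below) =====
def Claim_equal_f : Prop := ∀ (a : List String), Dom_f a → Pre_f a → Spec_f a (f a)

-- ===== LEMMAS AND PROOFS =====
lemma go_eq (rest : List String) : ∀ (cur : String) (res : List String),
    fAltGo res cur rest = res.reverse ++ f (cur :: rest) := by
  induction rest with
  | nil => intro cur res; simp [fAltGo, f]
  | cons nxt rest ih =>
    intro cur res
    rw [fAltGo, f]
    split_ifs with h1 h2 <;> simp [ih]

-- ===== VERDICT (by name: the statement is the Claim_ definition above) =====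
theorem f_spec : Claim_equal_f := by
  intro a _ hpre
  unfold Spec_f f_alt
  match a with
  | [] => exact absurd rfl hpre
  | [x] => simp [f]
  | x :: y :: ys => simp [go_eq]
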